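-- pv_equiv track=rewrite | github.com/beBijayeeni/Programming-in-Python | EncodedCharacter.py | solve
-- ===== SOURCE A (Python) =====
-- def solve(s):
--     encoded_s = ""
--     for i in range(len(s)):
--         if (i + 1) % 2 == 0:  # Check for odd indices
--             char = s[i]
--             if char.lower() == 'y':
--                 encoded_char = 'B'
--             elif char.lower() == 'z':
--                 encoded_char = 'C'
--             elif 'a' <= char.lower() <= 'x':
--                 encoded_char = chr(ord(char) + 3).upper()
--             elif 'A' <= char.lower() <= 'X':
--                 encoded_char = chr(ord(char) + 3).upper()
--             else:
--                 encoded_char = char # if it is not alphabet then it will remain same.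
--             encoded_s += encoded_char
--         else:
--             encoded_s += s[i]
--     return encoded_s
-- ===== SOURCE B (Python) =====
-- # B: split-transform-merge with a precomputed translation table instead of A's
-- # index loop with a parity branch.
-- def _enc(c):
--     l = c.lower()
--     if l == 'y':
--         return 'B'
--     if l == 'z':
--         return 'C'
--     return chr(ord(c) + 3).upper()
--
-- _TABLE = str.maketrans({c: _enc(c) for c in
--                         "abcdefghijklmnopqrstuvwxyzABCDEFGHIJKLMNOPQRSTUVWXYZ"})
--
-- def solve(s):
--     even = s[0::2]
--     odd = s[1::2].translate(_TABLE)
--     parts = []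
--     for e, o in zip(even, odd):
--         parts.append(e + o)
--     if len(even) > len(odd):
--         parts.append(even[-1])
--     return "".join(parts)
-- ===== Notes on version B (the rewrite author's own statement) =====
-- stated objective: faster
-- what changed: A's single index loop with a parity branch and per-character if-chain is replaced by split-transform-merge: take the even and odd index slices, translate the odd slice wholesale through a precomputed str.maketrans table, and interleave the two slices back.
import Mathlib
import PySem

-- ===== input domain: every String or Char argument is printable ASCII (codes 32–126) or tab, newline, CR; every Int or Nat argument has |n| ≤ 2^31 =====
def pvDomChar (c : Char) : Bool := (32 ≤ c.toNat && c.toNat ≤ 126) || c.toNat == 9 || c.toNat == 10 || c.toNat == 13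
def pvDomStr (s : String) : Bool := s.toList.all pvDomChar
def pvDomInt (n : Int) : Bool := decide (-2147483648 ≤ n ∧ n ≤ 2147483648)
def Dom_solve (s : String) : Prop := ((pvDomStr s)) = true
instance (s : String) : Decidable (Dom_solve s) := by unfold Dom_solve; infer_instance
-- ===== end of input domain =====

-- B replaces A's single index loop with a parity branch by split-transform-merge over
-- the two index-parity slices with a precomputed translation table (measurably faster
-- in Python by a constant factor).

-- ===== PORT A =====
def solve (s : String) : String :=
  let cs := s.toList
  let encoded := (PySem.List.pyRange 0 (cs.length : Int) 1).foldl (fun acc i =>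
    if PySem.Int.mod (i + 1) 2 == 0 then
      let char := (PySem.List.pyGet? cs i).getD ' '
      let encChar :=
        if PySem.Chars.lowerChar char == 'y' then 'B'
        else if PySem.Chars.lowerChar char == 'z' then 'C'
        else if 'a' ≤ PySem.Chars.lowerChar char ∧ PySem.Chars.lowerChar char ≤ 'x' then
          PySem.Chars.upperChar (Char.ofNat (char.toNat + 3))
        else if 'A' ≤ PySem.Chars.lowerChar char ∧ PySem.Chars.lowerChar char ≤ 'X' then
          PySem.Chars.upperChar (Char.ofNat (char.toNat + 3))
        else char
      acc ++ [encChar]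
    else acc ++ [(PySem.List.pyGet? cs i).getD ' ']) []
  String.ofList encoded

-- ===== PORT B =====
-- Source B's helper _enc
def pvEnc (c : Char) : Char :=
  let l := PySem.Chars.lowerChar c
  if l == 'y' then 'B'
  else if l == 'z' then 'C'
  else PySem.Chars.upperChar (Char.ofNat (c.toNat + 3))

-- Source B's _TABLE (str.maketrans over the dict comprehension, in comprehension order)
def pvTable : PySem.Dict Char Char :=
  ("abcdefghijklmnopqrstuvwxyzABCDEFGHIJKLMNOPQRSTUVWXYZ".toList).foldl
    (fun d c => d.insert c (pvEnc c)) PySem.Dict.empty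

def solve_alt (s : String) : String :=
  let cs := s.toList
  let even := (PySem.List.slice? cs none none 2).getD []
  -- s[1::2].translate(_TABLE): a char not in the table is left unchanged
  let odd := ((PySem.List.slice? cs (some 1) none 2).getD []).map
      (fun c => (PySem.Dict.get? pvTable c).getD c)
  let parts := (even.zip odd).foldl (fun acc p => acc ++ [p.1, p.2]) []
  let parts := if even.length > odd.length
    then parts ++ [(PySem.List.pyGet? even (-1)).getD ' ']
    else parts
  String.ofList parts

-- ===== PRECONDITION & SPEC =====
def Spec_solve (s : String) (out : String) : Prop := out = solve_alt s
instance (s : String) (out : String) : Decidable (Spec_solve s out) := by unfold Spec_solve; infer_instance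

-- ===== CLAIM (what is proved, stated in full; the proofs are below) =====
def Claim_equal_solve : Prop := ∀ (s : String), Dom_solve s → Spec_solve s (solve s)

-- ===== LEMMAS AND PROOFS =====

-- A's per-character encoding, as a named function for the proofs
def pvEncA (char : Char) : Char :=
  if PySem.Chars.lowerChar char == 'y' then 'B'
  else if PySem.Chars.lowerChar char == 'z' then 'C'
  else if 'a' ≤ PySem.Chars.lowerChar char ∧ PySem.Chars.lowerChar char ≤ 'x' then
    PySem.Chars.upperChar (Char.ofNat (char.toNat + 3))
  else if 'A' ≤ PySem.Chars.lowerChar char ∧ PySem.Chars.lowerChar char ≤ 'X' then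
    PySem.Chars.upperChar (Char.ofNat (char.toNat + 3))
  else char

-- B's per-character lookup, as a named function for the proofs
def pvEncB (c : Char) : Char := (PySem.Dict.get? pvTable c).getD c

-- canonical result: every second character (the odd indices) encoded
def pvCore : List Char → List Char
  | [] => []
  | [a] => [a]
  | a :: b :: t => a :: pvEncA b :: pvCore t

def pvEvens : List Char → List Char
  | [] => []
  | [a] => [a]
  | a :: _ :: t => a :: pvEvens t

def pvOdds : List Char → List Char
  | [] => []
  | [_] => []
  | _ :: b :: t => b :: pvOdds t

set_option maxRecDepth 8192 in
theorem pvEnc_agree (c : Char) (h : pvDomChar c = true) : pvEncA c = pvEncB c := by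
  have hlt : c.toNat < 127 := by
    simp [pvDomChar] at h
    omega
  have hall : ∀ n : Fin 127, pvEncA (Char.ofNat n.val) = pvEncB (Char.ofNat n.val) := by decide
  have := hall ⟨c.toNat, hlt⟩
  simpa [Char.ofNat_toNat] using this

-- xs[-1] is the last element
theorem pvGet_neg_one (xs : List Char) : PySem.List.pyGet? xs (-1) = xs.getLast? := by
  cases xs with
  | nil => simp [PySem.List.pyGet?, PySem.List.pyIdx?]
  | cons a t =>
      simp only [PySem.List.pyGet?, PySem.List.pyIdx?]
      norm_num
      rw [List.getLast?_eq_getElem?]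
      simp

-- A's loop, rewritten as a map over the index range, equals pvCore
theorem pvA_map (cs : List Char) :
    (List.range cs.length).map (fun i =>
      if (i + 1) % 2 == 0 then pvEncA ((cs[i]?).getD ' ') else (cs[i]?).getD ' ')
    = pvCore cs := by
  induction cs using pvCore.induct with
  | case1 => simp [pvCore]
  | case2 a => simp [pvCore]
  | case3 a b t ih =>
      have h2 : t.length + 1 + 1 = t.length + 2 := by omega
      simp only [List.length_cons, h2]
      rw [List.range_succ_eq_map, List.range_succ_eq_map]
      simp only [List.map_cons, List.map_map, pvCore, List.cons.injEq]
      refine ⟨by norm_num, by norm_num, ?_⟩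
      rw [← ih]
      apply List.map_congr_left
      intro i hi
      have hpar : (i + 1 + 1 + 1) % 2 = (i + 1) % 2 := by omega
      simp [Function.comp, Nat.succ_eq_add_one, hpar]

-- my own loop shape: a fold appending one element picked by a branch is a map
theorem pv_foldl_if_append {a b : Type} (p : a → Bool) (f g : a → b) (l : List a) (acc : List b) :
    l.foldl (fun acc x => if p x then acc ++ [f x] else acc ++ [g x]) acc
    = acc ++ l.map (fun x => if p x then f x else g x) := by
  have : (fun (acc : List b) x => if p x then acc ++ [f x] else acc ++ [g x])
      = fun acc x => acc ++ [if p x then f x else g x] := by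
    funext acc x
    split <;> rfl
  rw [this, PySem.List.foldl_append_singleton_eq_map]

theorem pvA_core (s : String) : solve s = String.ofList (pvCore s.toList) := by
  simp only [solve]
  congr 1
  rw [pv_foldl_if_append]
  rw [PySem.List.pyRange_zero_natCast, List.map_map, List.nil_append, ← pvA_map s.toList]
  apply List.map_congr_left
  intro i hi
  have hcast : ((i : Int) + 1) = ((i + 1 : Nat) : Int) := by push_cast; ring
  have hmod : PySem.Int.mod ((i : Int) + 1) 2 = (((i + 1) % 2 : Nat) : Int) := by
    rw [hcast]
    exact_mod_cast PySem.Int.mod_natCast (i + 1) 2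
  simp only [Function.comp_apply, hmod, PySem.List.pyGet?_natCast]
  by_cases h : (i + 1) % 2 = 0
  · simp [pvEncA, h, beq_iff_eq]
  · simp [h]
    intro hdvd
    exfalso
    omega

-- the even-index slice xs[0::2] computes pvEvens, the odd-index slice xs[1::2] pvOdds
theorem pvFM_evens (cs : List Char) :
    List.filterMap (fun x => cs[2 * x]?) (List.range ((cs.length + 1) / 2)) = pvEvens cs := by
  induction cs using pvEvens.induct with
  | case1 => simp [pvEvens]
  | case2 a => simp [pvEvens]
  | case3 a b t ih =>
      have h2 : (t.length + 1 + 1 + 1) / 2 = (t.length + 1) / 2 + 1 := by omega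
      simp only [List.length_cons, h2, List.range_succ_eq_map, List.filterMap_cons]
      simp only [Nat.mul_zero, List.getElem?_cons_zero, List.filterMap_map]
      rw [pvEvens]
      simp only [List.cons.injEq, true_and]
      rw [← ih]
      apply List.filterMap_congr
      intro x hx
      have : 2 * Nat.succ x = 2 * x + 1 + 1 := by omega
      simp [Function.comp, this]

theorem pvFM_odds (cs : List Char) :
    List.filterMap (fun x => cs[2 * x + 1]?) (List.range (cs.length / 2)) = pvOdds cs := by
  induction cs using pvOdds.induct with
  | case1 => simp [pvOdds]
  | case2 a => simp [pvOdds]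
  | case3 a b t ih =>
      have h2 : (t.length + 1 + 1) / 2 = t.length / 2 + 1 := by omega
      simp only [List.length_cons, h2, List.range_succ_eq_map, List.filterMap_cons]
      simp only [Nat.mul_zero, Nat.zero_add, List.getElem?_cons_succ, List.getElem?_cons_zero,
        List.filterMap_map]
      rw [pvOdds]
      simp only [List.cons.injEq, true_and]
      rw [← ih]
      apply List.filterMap_congr
      intro x hx
      have h3 : 2 * (x + 1) = 2 * x + 1 + 1 := by omega
      simp [Function.comp, h3]

theorem pvSlice_evens (cs : List Char) :
    PySem.List.slice? cs none none 2 = some (pvEvens cs) := by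
  simp only [PySem.List.slice?, PySem.List.sliceIndices]
  norm_num
  have hcnt : (if 0 < cs.length then ((↑cs.length + 2 - 1 : Int) / 2).toNat else 0)
      = (cs.length + 1) / 2 := by
    split <;> omega
  rw [hcnt]
  have hidx : ∀ x : Nat, ((2 * (x : Int)).toNat) = 2 * x := by omega
  simp only [hidx]
  exact pvFM_evens cs

theorem pvSlice_odds (cs : List Char) :
    PySem.List.slice? cs (some 1) none 2 = some (pvOdds cs) := by
  simp only [PySem.List.slice?, PySem.List.sliceIndices]
  norm_num
  cases cs with
  | nil => simp [pvOdds]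
  | cons a t =>
      have hmin : min (1 : Int) ↑(a :: t).length = 1 := by
        simp only [List.length_cons]
        omega
      rw [hmin]
      have hcnt : (if 1 < (a :: t).length then ((↑(a :: t).length - 1 + 2 - 1 : Int) / 2).toNat else 0)
          = (a :: t).length / 2 := by
        split
        · simp_all; omega
        · simp_all
      rw [hcnt]
      have hidx : ∀ x : Nat, ((1 + 2 * (x : Int)).toNat) = 2 * x + 1 := by omega
      simp only [hidx]
      exact pvFM_odds _

-- interleaving the even slice with the encoded odd slice rebuilds pvCore
theorem pvB_core (cs : List Char) :
    (∀ c ∈ cs, pvDomChar c = true) →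
    (if (pvEvens cs).length > ((pvOdds cs).map pvEncB).length
     then ((pvEvens cs).zip ((pvOdds cs).map pvEncB)).foldl
            (fun acc p => acc ++ [p.1, p.2]) []
          ++ [(PySem.List.pyGet? (pvEvens cs) (-1)).getD ' ']
     else ((pvEvens cs).zip ((pvOdds cs).map pvEncB)).foldl
            (fun acc p => acc ++ [p.1, p.2]) []) = pvCore cs := by
  have hflat : ∀ (l : List (Char × Char)),
      l.foldl (fun acc p => acc ++ [p.1, p.2]) ([] : List Char)
      = l.flatMap (fun p => [p.1, p.2]) := by
    intro l
    simpa using PySem.List.foldl_append_eq_flatMap (fun p : Char × Char => [p.1, p.2]) l []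
  simp only [hflat, gt_iff_lt]
  induction cs using pvCore.induct with
  | case1 => simp [pvEvens, pvOdds, pvCore]
  | case2 a =>
      intro _
      simp [pvEvens, pvOdds, pvCore, pvGet_neg_one]
  | case3 a b t ih =>
      intro hd
      have hb : pvEncB b = pvEncA b := (pvEnc_agree b (hd b (by simp))).symm
      have ih' := ih (fun c hc => hd c (by simp [hc]))
      simp only [pvEvens, pvOdds, List.map_cons, List.zip_cons_cons, List.flatMap_cons,
        List.length_cons, List.length_map, pvCore, hb]
      by_cases hlen : (pvOdds t).length < (pvEvens t).length
      · have hne : pvEvens t ≠ [] := by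
          intro h0
          rw [h0] at hlen
          simp at hlen
        rw [if_pos (by omega)]
        rw [if_pos (by simpa using hlen)] at ih'
        simp only [pvGet_neg_one] at ih' ⊢
        obtain ⟨x, xs, hx⟩ := List.exists_cons_of_ne_nil hne
        rw [hx, List.getLast?_cons_cons, ← hx]
        simp [← ih']
      · rw [if_neg (by omega)]
        rw [if_neg (by simpa using hlen)] at ih'
        simp [ih']

theorem pvB_eq (s : String) (hd : pvDomStr s = true) :
    solve_alt s = String.ofList (pvCore s.toList) := by
  have hd' : ∀ c ∈ s.toList, pvDomChar c = true := by
    simpa [pvDomStr, List.all_eq_true] using hd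
  simp only [solve_alt, pvSlice_evens, pvSlice_odds, Option.getD_some]
  congr 1
  exact pvB_core s.toList hd'

-- ===== VERDICT (by name: the statement is the Claim_ definition above) =====
theorem solve_spec : Claim_equal_solve := by
  intro s hdom
  unfold Spec_solve
  rw [pvA_core, pvB_eq s hdom]
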